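-- pv_equiv track=rewrite | github.com/chuoer47/AlgorithmLearning | 刷题记录/LeetCode/周赛/第458场周赛/用特殊操作处理字符串 II.py | processStr
-- ===== SOURCE A (Python) =====
-- def processStr(s: str, k: int) -> str:
--     # 先计算长度 + 特判
--     pi = []
--     size = 0
--     for val in s:
--         if val == "*":
--             if size > 0:
--                 size -= 1
--         elif val == "#":
--             size *= 2
--         elif val == "%":
--             pass
--         else:
--             size += 1
--         pi.append(size)
--     if k >= size:
--         return '.'
--
--     # 反向获取
--     # dfs(i,k) 遍历s的前i个操作得到的字符串的 下标为k的字符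
--     n = len(s)
--
--     def dfs(idx, k):
--         val = s[idx]
--         length = pi[idx]
--
--         if val == "*":
--             return dfs(idx - 1, k)
--         elif val == '#':
--             if k >= length // 2:
--                 return dfs(idx - 1, k - length // 2)
--             return dfs(idx - 1, k)
--         elif val == '%':
--             return dfs(idx - 1, length - k - 1)
--         else:
--             if k + 1 == length:
--                 return val
--             return dfs(idx - 1, k)
--
--     ans = dfs(n - 1, k)
--     return ans
-- ===== SOURCE B (Python) =====
-- def processStr(s: str, k: int) -> str:
--     pi = []
--     size = 0
--     for val in s:
--         if val == "*":
--             if size > 0: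
--                 size -= 1
--         elif val == "#":
--             size *= 2
--         elif val == "%":
--             pass
--         else:
--             size += 1
--         pi.append(size)
--     if k >= size:
--         return '.'
--     # iterative backwards scan instead of recursion
--     for idx in range(len(s) - 1, -1, -1):
--         val = s[idx]
--         length = pi[idx]
--         if val == "#":
--             if k >= length // 2:
--                 k -= length // 2
--         elif val == "%":
--             k = length - k - 1
--         elif val != "*":
--             if k + 1 == length:
--                 return val
-- ===== Notes on version B (the rewrite author's own statement) =====
-- stated objective: simpler
-- what changed: The recursive dfs (one Python stack frame per operation, limited by the interpreter recursion limit) is replaced by an explicit backwards for-loop over the indices that updates k in place and returns on the literal character.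
-- outside the precondition, e.g. on processStr('%a', -1): A returns 'a', B returns None; on processStr('a', -1): A raises IndexError, B returns None
import Mathlib
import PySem

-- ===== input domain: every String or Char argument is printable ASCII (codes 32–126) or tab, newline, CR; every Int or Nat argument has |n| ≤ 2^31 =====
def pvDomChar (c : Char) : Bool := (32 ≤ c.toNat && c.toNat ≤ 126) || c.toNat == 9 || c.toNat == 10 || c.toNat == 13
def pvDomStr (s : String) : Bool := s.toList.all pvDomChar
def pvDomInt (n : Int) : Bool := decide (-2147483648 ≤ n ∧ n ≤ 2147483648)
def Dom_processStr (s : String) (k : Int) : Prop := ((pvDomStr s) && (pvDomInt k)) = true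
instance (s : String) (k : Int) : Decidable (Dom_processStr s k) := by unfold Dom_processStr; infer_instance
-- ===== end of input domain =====

-- B replaces A's recursive dfs by an explicit backwards for-loop (same forward size pass); objective: simpler.

-- ===== PORT A =====
-- forward pass (textually identical in A and B, so it is shared):
-- state after one character: if '*' then size-1 when positive, '#' doubles, '%' keeps, else +1
def nextSize (sz : Int) (val : Char) : Int :=
  if val = '*' then (if sz > 0 then sz - 1 else sz)
  else if val = '#' then sz * 2
  else if val = '%' then sz
  else sz + 1

def buildPi (cs : List Char) : List Int × Int :=
  cs.foldl (fun acc val =>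
    let size := nextSize acc.2 val
    (acc.1 ++ [size], size)) ([], 0)

-- A's dfs; fuel only makes the recursion total: none = IndexError / fuel exhausted
def dfsA (cs : List Char) (pi : List Int) : Nat → Int → Int → Option Char
  | 0, _, _ => none
  | fuel+1, idx, k =>
    match PySem.List.pyGet? cs idx, PySem.List.pyGet? pi idx with
    | some val, some length =>
      if val = '*' then dfsA cs pi fuel (idx - 1) k
      else if val = '#' then
        if k ≥ PySem.Int.floordiv length 2 then dfsA cs pi fuel (idx - 1) (k - PySem.Int.floordiv length 2)
        else dfsA cs pi fuel (idx - 1) k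
      else if val = '%' then dfsA cs pi fuel (idx - 1) (length - k - 1)
      else if k + 1 = length then some val
      else dfsA cs pi fuel (idx - 1) k
    | _, _ => none

def processStr (s : String) (k : Int) : String :=
  let cs := s.toList
  let bp := buildPi cs
  if k ≥ bp.2 then "."
  else
    match dfsA cs bp.1 (cs.length + cs.length + 2) ((cs.length : Int) - 1) k with
    | some c => String.ofList [c]
    | none => ""   -- A raises here; excluded by Pre_

-- ===== PORT B =====
-- one iteration of B's for-loop body: either return a char or continue with a new k
def stepB (val : Char) (length k : Int) : Sum Char Int :=
  if val = '#' then
    if k ≥ PySem.Int.floordiv length 2 then Sum.inr (k - PySem.Int.floordiv length 2) else Sum.inr k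
  else if val = '%' then Sum.inr (length - k - 1)
  else if val ≠ '*' then
    (if k + 1 = length then Sum.inl val else Sum.inr k)
  else Sum.inr k

-- for idx in range(n-1, -1, -1): (idx counts down; falling off the loop = Python returns None)
def loopB (cs : List Char) (pi : List Int) : Nat → Int → Option Char
  | 0, k =>
    match stepB (cs.getD 0 ' ') (pi.getD 0 0) k with
    | Sum.inl c => some c
    | Sum.inr _ => none
  | idx+1, k =>
    match stepB (cs.getD (idx+1) ' ') (pi.getD (idx+1) 0) k with
    | Sum.inl c => some c
    | Sum.inr k' => loopB cs pi idx k'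

def processStr_alt (s : String) (k : Int) : String :=
  let cs := s.toList
  let bp := buildPi cs
  if k ≥ bp.2 then "."
  else
    match cs.length with
    | 0 => ""    -- empty loop range, Python B returns None; excluded by Pre_
    | n+1 =>
      match loopB cs bp.1 n k with
      | some c => String.ofList [c]
      | none => ""

-- ===== PRECONDITION & SPEC =====
-- Pre_ excludes k < 0: there A either raises IndexError or returns a value produced by Python's
-- accidental negative-index wraparound in s[idx]/pi[idx], while B falls off its loop returning None (not a str).
def Pre_processStr (s : String) (k : Int) : Prop := 0 ≤ k
instance (s : String) (k : Int) : Decidable (Pre_processStr s k) := by unfold Pre_processStr; infer_instance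
def pvWitness_processStr : String × Int := ("ab#", 1)
def Spec_processStr (s : String) (k : Int) (out : String) : Prop := out = processStr_alt s k
instance (s : String) (k : Int) (out : String) : Decidable (Spec_processStr s k out) := by unfold Spec_processStr; infer_instance

-- ===== CLAIM =====
def Claim_equal_processStr : Prop := ∀ (s : String) (k : Int), Dom_processStr s k → Pre_processStr s k → Spec_processStr s k (processStr s k)

-- ===== LEMMAS AND PROOFS =====

-- the list of running sizes, built from the front
def pis (sz : Int) : List Char → List Int
  | [] => []
  | c :: cs => nextSize sz c :: pis (nextSize sz c) cs

def finalSize (sz : Int) : List Char → Int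
  | [] => sz
  | c :: cs => finalSize (nextSize sz c) cs

theorem buildPi_eq_fold (cs : List Char) : ∀ (l : List Int) (sz : Int),
    cs.foldl (fun acc val => let size := nextSize acc.2 val; (acc.1 ++ [size], size)) (l, sz)
      = (l ++ pis sz cs, finalSize sz cs) := by
  induction cs with
  | nil => simp [pis, finalSize]
  | cons c cs ih => intro l sz; simp [List.foldl, pis, finalSize, ih]

theorem buildPi_eq (cs : List Char) : buildPi cs = (pis 0 cs, finalSize 0 cs) := by
  simpa using buildPi_eq_fold cs [] 0

theorem length_pis (sz : Int) (cs : List Char) : (pis sz cs).length = cs.length := by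
  induction cs generalizing sz with
  | nil => rfl
  | cons c cs ih => simp [pis, ih]

theorem finalSize_eq_getLastD (sz : Int) (cs : List Char) :
    finalSize sz cs = (pis sz cs).getLastD sz := by
  induction cs generalizing sz with
  | nil => rfl
  | cons c cs ih => simp only [finalSize, pis, ih, List.getLastD_cons]

theorem pis_getD_succ (sz : Int) (cs : List Char) : ∀ (i : Nat), i + 1 < cs.length →
    (pis sz cs).getD (i+1) 0 = nextSize ((pis sz cs).getD i 0) (cs.getD (i+1) ' ') := by
  induction cs generalizing sz with
  | nil => intro i h; simp at h
  | cons c cs ih =>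
    intro i h
    cases i with
    | zero =>
      cases cs with
      | nil => simp at h
      | cons d ds => simp [pis]
    | succ j =>
      have := ih (nextSize sz c) j (by simpa using h)
      simpa [pis] using this

-- key equivalence of the two backwards passes
theorem key (cs : List Char) (idx : Nat) : ∀ (fuel : Nat) (k : Int),
    idx < cs.length → idx + 1 ≤ fuel → 0 ≤ k → k < (pis 0 cs).getD idx 0 →
    dfsA cs (pis 0 cs) fuel (idx : Int) k = loopB cs (pis 0 cs) idx k ∧
      (loopB cs (pis 0 cs) idx k).isSome := by
  induction idx with
  | zero =>
    intro fuel k hlen hfuel hk0 hklt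
    obtain ⟨f, rfl⟩ : ∃ f, fuel = f + 1 := ⟨fuel - 1, by omega⟩
    obtain ⟨c, cs', rfl⟩ : ∃ c cs', cs = c :: cs' := by
      cases cs with
      | nil => simp at hlen
      | cons c cs' => exact ⟨c, cs', rfl⟩
    have hns : (pis 0 (c :: cs')).getD 0 0 = nextSize 0 c := by simp [pis]
    rw [hns] at hklt
    have hg1 : PySem.List.pyGet? (c :: cs') ((0 : Nat) : Int) = some c := by
      simp
    have hg2 : PySem.List.pyGet? (pis 0 (c :: cs')) ((0 : Nat) : Int) = some (nextSize 0 c) := by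
      simp [pis]
    by_cases h1 : c = '*'
    · simp [nextSize, h1] at hklt; omega
    · by_cases h2 : c = '#'
      · simp [nextSize, h2] at hklt; omega
      · by_cases h3 : c = '%'
        · simp [nextSize, h3] at hklt; omega
        · have hval : nextSize 0 c = 1 := by simp [nextSize, h1, h2, h3]
          have hk : k = 0 := by omega
          subst hk
          simp only [dfsA, loopB, stepB, hg1, hg2]
          simp [h1, h2, h3, hval, List.getD, pis]
  | succ i ih =>
    intro fuel k hlen hfuel hk0 hklt
    obtain ⟨f, rfl⟩ : ∃ f, fuel = f + 1 := ⟨fuel - 1, by omega⟩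
    have hlen' : i + 1 < (pis 0 cs).length := by rw [length_pis]; exact hlen
    set val := cs.getD (i+1) ' ' with hvaldef
    set L := (pis 0 cs).getD (i+1) 0 with hLdef
    set P := (pis 0 cs).getD i 0 with hPdef
    have hLP : L = nextSize P val := pis_getD_succ 0 cs i hlen
    have hg1 : PySem.List.pyGet? cs (((i+1 : Nat)) : Int) = some val := by
      rw [PySem.List.pyGet?_natCast]
      simp [hvaldef, List.getElem?_eq_getElem hlen]
    have hg2 : PySem.List.pyGet? (pis 0 cs) (((i+1 : Nat)) : Int) = some L := by
      rw [PySem.List.pyGet?_natCast]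
      simp [hLdef, List.getElem?_eq_getElem hlen']
    have hidx : (((i+1 : Nat)) : Int) - 1 = (i : Int) := by push_cast; ring
    have hf : i + 1 ≤ f := by omega
    have hil : i < cs.length := by omega
    have loopstep : ∀ k' : Int, loopB cs (pis 0 cs) (i+1) k' =
        (match stepB val L k' with
         | Sum.inl c => some c
         | Sum.inr k'' => loopB cs (pis 0 cs) i k'') := fun _ => rfl
    by_cases h1 : val = '#'
    · have h1s : val ≠ '*' := by rw [h1]; decide
      have hL2 : L = P * 2 := by rw [hLP]; simp [nextSize, h1]
      have hfd : PySem.Int.floordiv L 2 = P := by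
        rw [PySem.Int.floordiv_eq_ediv_of_pos (by norm_num)]; omega
      by_cases hge : k ≥ PySem.Int.floordiv L 2
      · have ihres := ih f (k - P) hil hf (by rw [hfd] at hge; omega) (by rw [hfd] at hge; omega)
        rw [loopstep]
        have hstep : stepB val L k = Sum.inr (k - P) := by
          simp only [stepB]; rw [if_pos h1, if_pos hge, hfd]
        rw [hstep]
        simp only [dfsA, hg1, hg2]
        rw [if_neg h1s, if_pos h1, if_pos hge, hfd, hidx]
        exact ihres
      · have ihres := ih f k hil hf hk0 (by omega)
        rw [loopstep]
        have hstep : stepB val L k = Sum.inr k := by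
          simp only [stepB]; rw [if_pos h1, if_neg hge]
        rw [hstep]
        simp only [dfsA, hg1, hg2]
        rw [if_neg h1s, if_pos h1, if_neg hge, hidx]
        exact ihres
    · by_cases h2 : val = '%'
      · have h1s : val ≠ '*' := by rw [h2]; decide
        have hL2 : L = P := by rw [hLP]; simp [nextSize, h2]
        have ihres := ih f (L - k - 1) hil hf (by omega) (by omega)
        rw [loopstep]
        have hstep : stepB val L k = Sum.inr (L - k - 1) := by
          simp only [stepB]; rw [if_neg h1, if_pos h2]
        rw [hstep]
        simp only [dfsA, hg1, hg2]
        rw [if_neg h1s, if_neg h1, if_pos h2, hidx]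
        exact ihres
      · by_cases h3 : val = '*'
        · have hL2 : L = P ∨ L = P - 1 := by
            rw [hLP]; simp [nextSize, h3]; omega
          have ihres := ih f k hil hf hk0 (by omega)
          rw [loopstep]
          have hstep : stepB val L k = Sum.inr k := by
            simp only [stepB]; rw [if_neg h1, if_neg h2, if_neg (by simp [h3])]
          rw [hstep]
          simp only [dfsA, hg1, hg2]
          rw [if_pos h3, hidx]
          exact ihres
        · have hL2 : L = P + 1 := by rw [hLP]; simp [nextSize, h1, h2, h3]
          by_cases hret : k + 1 = L
          · rw [loopstep]
            have hstep : stepB val L k = Sum.inl val := by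
              simp only [stepB]; rw [if_neg h1, if_neg h2, if_pos (by simp [h3]), if_pos hret]
            rw [hstep]
            simp only [dfsA, hg1, hg2]
            rw [if_neg h3, if_neg h1, if_neg h2, if_pos hret]
            exact ⟨rfl, rfl⟩
          · have ihres := ih f k hil hf hk0 (by omega)
            rw [loopstep]
            have hstep : stepB val L k = Sum.inr k := by
              simp only [stepB]; rw [if_neg h1, if_neg h2, if_pos (by simp [h3]), if_neg hret]
            rw [hstep]
            simp only [dfsA, hg1, hg2]
            rw [if_neg h3, if_neg h1, if_neg h2, if_neg hret, hidx]
            exact ihres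

theorem getLastD_eq_getD {α : Type} (l : List α) (d : α) :
    l.getLastD d = l.getD (l.length - 1) d := by
  simp [List.getLastD_eq_getLast?, List.getLast?_eq_getElem?, List.getD]

-- ===== VERDICT =====
theorem processStr_spec : Claim_equal_processStr := by
  intro s k _hdom hpre
  unfold Pre_processStr at hpre
  unfold Spec_processStr processStr processStr_alt
  simp only [buildPi_eq]
  by_cases hk : k ≥ finalSize 0 s.toList
  · rw [if_pos hk, if_pos hk]
  · rw [if_neg hk, if_neg hk]
    cases hcs : s.toList with
    | nil =>
      exfalso
      rw [hcs] at hk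
      simp [finalSize] at hk
      omega
    | cons c cs' =>
      rw [hcs] at hk
      set cs := c :: cs' with hcsdef
      have hsz : finalSize 0 cs = (pis 0 cs).getD (cs'.length) 0 := by
        rw [finalSize_eq_getLastD, getLastD_eq_getD, length_pis]
        simp [hcsdef]
      have hkey := key cs cs'.length (cs.length + cs.length + 2) k
        (by simp [hcsdef]) (by simp [hcsdef]; omega) hpre (by rw [← hsz]; omega)
      have hcast : ((cs.length : Int) - 1) = ((cs'.length : Nat) : Int) := by
        simp [hcsdef]
      rw [hcast]
      obtain ⟨heq, hsome⟩ := hkey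
      obtain ⟨ch, hch⟩ := Option.isSome_iff_exists.mp hsome
      show (match dfsA cs (pis 0 cs) (cs.length + cs.length + 2) ((cs'.length : Nat) : Int) k with
            | some c => String.ofList [c] | none => "") =
           (match loopB cs (pis 0 cs) cs'.length k with
            | some c => String.ofList [c] | none => "")
      rw [heq, hch]
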